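-- pv_equiv track=rewrite | github.com/dykim29/advent_of_code | 2022/day4/solution.py | part2
-- ===== SOURCE A (Python) =====
-- def part2(x):
--     n_overlaps = 0
--     for assignments in x:
--         assignment1 = assignments[0]
--         assignment2 = assignments[1]
--         if len(set(assignment1).intersection(assignment2)) > 0:
--             n_overlaps += 1
--     return n_overlaps
-- ===== SOURCE B (Python) =====
-- def _has_common(sa, sb):
--     # sa, sb sorted ascending: two-pointer scan for a shared element
--     i, j = 0, 0
--     while i < len(sa) and j < len(sb):
--         if sa[i] == sb[j]:
--             return True
--         if sa[i] < sb[j]: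
--             i += 1
--         else:
--             j += 1
--     return False
--
--
-- def part2(x):
--     return sum(1 for a, b in x if _has_common(sorted(a), sorted(b)))
-- ===== Notes on version B (the rewrite author's own statement) =====
-- stated objective: alternative
-- what changed: Replaces the per-pair hash-set intersection (build set(a), intersect with b, test its size) by sorting both lists and running a two-pointer merge scan that stops at the first shared element; the count becomes a sum over a generator instead of a mutated accumulator.
import Mathlib
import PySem

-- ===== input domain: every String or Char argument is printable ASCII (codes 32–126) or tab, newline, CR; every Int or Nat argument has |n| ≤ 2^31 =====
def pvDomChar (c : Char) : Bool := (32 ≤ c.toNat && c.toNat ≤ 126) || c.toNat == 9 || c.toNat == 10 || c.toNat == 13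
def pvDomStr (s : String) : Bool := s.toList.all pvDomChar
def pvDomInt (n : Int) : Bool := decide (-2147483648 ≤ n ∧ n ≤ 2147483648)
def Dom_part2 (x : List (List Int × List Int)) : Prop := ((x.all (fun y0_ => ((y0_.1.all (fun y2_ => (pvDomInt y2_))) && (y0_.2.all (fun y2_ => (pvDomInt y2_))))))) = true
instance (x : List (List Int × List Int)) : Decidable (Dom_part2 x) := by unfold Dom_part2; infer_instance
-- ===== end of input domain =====

-- B sorts each pair's two lists and detects a shared element with a two-pointer merge scan,
-- instead of A's hash-set intersection; alternative algorithm, same results.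

-- ===== PORT A =====
def part2 (x : List (List Int × List Int)) : Int :=
  x.foldl (fun n_overlaps assignments =>
    if 0 < PySem.Set.len (PySem.Set.inter (PySem.Set.ofList assignments.1) assignments.2)
    then n_overlaps + 1 else n_overlaps) 0

-- ===== PORT B =====
-- two-pointer scan over two ascending lists (indices i/j advance = heads consumed)
def hasCommon : List Int → List Int → Bool
  | [], _ => false
  | _ :: _, [] => false
  | a :: as, b :: bs =>
    if a = b then true
    else if a < b then hasCommon as (b :: bs)
    else hasCommon (a :: as) bs

def part2_alt (x : List (List Int × List Int)) : Int :=
  (x.map (fun p =>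
    if hasCommon (PySem.List.sorted p.1 (fun v => v) false)
                 (PySem.List.sorted p.2 (fun v => v) false)
    then (1 : Int) else 0)).sum

-- ===== PRECONDITION & SPEC =====
def Spec_part2 (x : List (List Int × List Int)) (out : Int) : Prop := out = part2_alt x
instance (x : List (List Int × List Int)) (out : Int) : Decidable (Spec_part2 x out) := by unfold Spec_part2; infer_instance

-- ===== CLAIM (what is proved, stated in full; the proofs are below) =====
def Claim_equal_part2 : Prop := ∀ (x : List (List Int × List Int)), Dom_part2 x → Spec_part2 x (part2 x)

-- ===== LEMMAS AND PROOFS =====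

-- the merge scan finds a shared element iff one exists, given both lists are ascending
theorem hasCommon_iff : ∀ (a b : List Int),
    a.Pairwise (· ≤ ·) → b.Pairwise (· ≤ ·) →
    (hasCommon a b = true ↔ ∃ v, v ∈ a ∧ v ∈ b) := by
  intro a
  induction a with
  | nil => intro b _ _; simp [hasCommon]
  | cons x as iha =>
    intro b
    induction b with
    | nil => intro _ _; simp [hasCommon]
    | cons y bs ihb =>
      intro ha hb
      rw [hasCommon]
      rcases List.pairwise_cons.mp ha with ⟨hxa, has⟩
      rcases List.pairwise_cons.mp hb with ⟨hyb, hbs⟩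
      split_ifs with hxy hlt
      · subst hxy
        exact ⟨fun _ => ⟨x, by simp, by simp⟩, fun _ => rfl⟩
      · -- x < y : x is below everything in y :: bs, so drop x
        rw [iha (y :: bs) has (List.pairwise_cons.mpr ⟨hyb, hbs⟩)]
        constructor
        · rintro ⟨v, hva, hvb⟩; exact ⟨v, List.mem_cons_of_mem _ hva, hvb⟩
        · rintro ⟨v, hva, hvb⟩
          rcases List.mem_cons.mp hva with rfl | hva'
          · exfalso
            rcases List.mem_cons.mp hvb with rfl | hvb'
            · exact hxy rfl
            · exact absurd (hyb v hvb') (by omega)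
          · exact ⟨v, hva', hvb⟩
      · -- y < x : y is below everything in x :: as, so drop y
        rw [ihb ha hbs]
        constructor
        · rintro ⟨v, hva, hvb⟩; exact ⟨v, hva, List.mem_cons_of_mem _ hvb⟩
        · rintro ⟨v, hva, hvb⟩
          rcases List.mem_cons.mp hvb with rfl | hvb'
          · exfalso
            rcases List.mem_cons.mp hva with rfl | hva'
            · exact hxy rfl
            · exact absurd (hxa v hva') (by omega)
          · exact ⟨v, hva, hvb'⟩

-- pointwise: A's per-pair test equals B's per-pair test
theorem cond_eq (a b : List Int) :
    (0 < PySem.Set.len (PySem.Set.inter (PySem.Set.ofList a) b)) ↔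
    hasCommon (PySem.List.sorted a (fun v => v) false)
              (PySem.List.sorted b (fun v => v) false) = true := by
  rw [hasCommon_iff _ _ (PySem.List.sorted_pairwise a (fun v => v))
        (PySem.List.sorted_pairwise b (fun v => v))]
  constructor
  · intro h
    have hne : PySem.Set.inter (PySem.Set.ofList a) b ≠ [] := by
      intro hnil
      simp [PySem.Set.len, hnil] at h
    rcases List.exists_mem_of_ne_nil _ hne with ⟨v, hv⟩
    rw [PySem.Set.mem_inter] at hv
    exact ⟨v, by simpa [PySem.List.mem_sorted] using ((PySem.Set.mem_ofList a v).mp hv.1),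
      by simpa [PySem.List.mem_sorted] using hv.2⟩
  · rintro ⟨v, hva, hvb⟩
    rw [PySem.List.mem_sorted] at hva hvb
    have hv : v ∈ PySem.Set.inter (PySem.Set.ofList a) b :=
      (PySem.Set.mem_inter _ _ v).mpr ⟨(PySem.Set.mem_ofList a v).mpr hva, hvb⟩
    have hlen := List.length_pos_of_mem hv
    simp [PySem.Set.len]
    omega

theorem part2_eq_alt (x : List (List Int × List Int)) : part2 x = part2_alt x := by
  unfold part2 part2_alt
  induction x using List.reverseRecOn with
  | nil => rfl
  | append_singleton xs p ih =>
    rw [List.foldl_append, List.map_append, List.sum_append, List.foldl, List.foldl,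
        List.map, List.sum_cons, List.map, List.sum_nil, ih]
    by_cases h : 0 < PySem.Set.len (PySem.Set.inter (PySem.Set.ofList p.1) p.2)
    · rw [if_pos h, if_pos ((cond_eq p.1 p.2).mp h)]; ring
    · rw [if_neg h, if_neg (fun hc => h ((cond_eq p.1 p.2).mpr hc))]; ring

-- ===== VERDICT (by name: the statement is the Claim_ definition above) =====
theorem part2_spec : Claim_equal_part2 := by
  intro x _
  unfold Spec_part2
  exact part2_eq_alt x
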